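-- pv_equiv track=rewrite | github.com/TessFerrandez/AdventOfCode-Python | 2015/day25.py | calculate_code
-- ===== SOURCE A (Python) =====
-- def calculate_code(order: int) -> int:
--     start = 20151125
--     times = 252533
--     divisor = 33554393
--
--     code = start
--     for i in range(order - 1):
--         code = (code * times) % divisor
--     return code
-- ===== SOURCE B (Python) =====
-- def calculate_code(order: int) -> int:
--     start = 20151125
--     times = 252533
--     divisor = 33554393
--
--     # binary (square-and-multiply) modular exponentiation, done by hand
--     e = order - 1
--     result = start % divisor
--     base = times
--     while e > 0:
--         if e % 2 == 1:
--             result = result * base % divisor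
--         base = base * base % divisor
--         e = e // 2
--     return result
-- ===== Notes on version B (the rewrite author's own statement) =====
-- stated objective: faster
-- what changed: Replaces the O(order) repeated modular-multiplication loop by hand-written binary (square-and-multiply) modular exponentiation with a halving loop.
import Mathlib
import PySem

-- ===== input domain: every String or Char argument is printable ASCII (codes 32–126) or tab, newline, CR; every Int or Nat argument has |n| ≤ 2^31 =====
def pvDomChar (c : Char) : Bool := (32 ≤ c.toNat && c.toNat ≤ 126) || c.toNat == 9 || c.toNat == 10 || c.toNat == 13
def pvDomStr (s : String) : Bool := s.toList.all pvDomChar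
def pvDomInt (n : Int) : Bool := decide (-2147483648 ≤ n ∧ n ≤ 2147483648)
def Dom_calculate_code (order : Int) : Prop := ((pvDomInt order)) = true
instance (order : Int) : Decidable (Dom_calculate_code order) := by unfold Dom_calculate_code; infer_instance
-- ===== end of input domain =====

-- B replaces A's O(order) repeated modular multiplication by hand-written binary (square-and-multiply) modular exponentiation (faster, asymptotic).


-- ===== PORT A =====
-- for i in range(order - 1): code = (code * times) % divisor
def calculate_code (order : Int) : Int :=
  let start : Int := 20151125
  let times : Int := 252533
  let divisor : Int := 33554393
  (PySem.List.pyRange 0 (order - 1) 1).foldl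
    (fun code _ => PySem.Int.mod (code * times) divisor) start

-- ===== PORT B =====
-- while e > 0: if e % 2 == 1: result = result*base % divisor; base = base*base % divisor; e = e // 2
def pvPowLoop (e result base : Int) : Int :=
  if _h : 0 < e then
    pvPowLoop (PySem.Int.floordiv e 2)
      (if PySem.Int.mod e 2 = 1 then PySem.Int.mod (result * base) 33554393 else result)
      (PySem.Int.mod (base * base) 33554393)
  else result
termination_by e.toNat
decreasing_by
  rw [PySem.Int.floordiv_eq_ediv_of_pos (by norm_num)]
  omega

def calculate_code_alt (order : Int) : Int :=
  let start : Int := 20151125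
  let divisor : Int := 33554393
  pvPowLoop (order - 1) (PySem.Int.mod start divisor) 252533

-- ===== PRECONDITION & SPEC =====
def Spec_calculate_code (order : Int) (out : Int) : Prop := out = calculate_code_alt order
instance (order : Int) (out : Int) : Decidable (Spec_calculate_code order out) := by unfold Spec_calculate_code; infer_instance

-- ===== CLAIM (what is proved, stated in full; the proofs are below) =====
def Claim_equal_calculate_code : Prop := ∀ (order : Int), Dom_calculate_code order → Spec_calculate_code order (calculate_code order)

-- ===== LEMMAS AND PROOFS =====

-- A's loop body only depends on the length of the range: folding it n times over
-- any list starting from c in [0, 33554393) yields (c * 252533^n) % 33554393.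
theorem pv_fold_eq_pow (l : List Int) (c : Int) (h0 : 0 ≤ c) (h1 : c < 33554393) :
    l.foldl (fun code _ => PySem.Int.mod (code * 252533) 33554393) c
      = (c * 252533 ^ l.length) % 33554393 := by
  induction l generalizing c with
  | nil =>
      simp [Int.emod_eq_of_lt h0 h1]
  | cons x xs ih =>
      have hm : PySem.Int.mod (c * 252533) 33554393 = (c * 252533) % 33554393 :=
        PySem.Int.mod_eq_emod_of_pos (by norm_num)
      have h0' : 0 ≤ (c * 252533) % 33554393 := Int.emod_nonneg _ (by norm_num)
      have h1' : (c * 252533) % 33554393 < 33554393 := Int.emod_lt_of_pos _ (by norm_num)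
      calc (x :: xs).foldl (fun code _ => PySem.Int.mod (code * 252533) 33554393) c
          = xs.foldl (fun code _ => PySem.Int.mod (code * 252533) 33554393)
              ((c * 252533) % 33554393) := by simp [List.foldl]
        _ = ((c * 252533) % 33554393 * 252533 ^ xs.length) % 33554393 := ih _ h0' h1'
        _ = (c * 252533 ^ (xs.length + 1)) % 33554393 := by
              rw [Int.mul_emod, Int.emod_emod_of_dvd _ (dvd_refl _), ← Int.mul_emod,
                  mul_assoc, ← pow_succ']

-- (a % m)^n % m = a^n % m, used by both branches below.
theorem pv_pow_emod (a : Int) (m : Int) (n : Nat) : (a % m) ^ n % m = a ^ n % m := by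
  induction n with
  | zero => simp
  | succ k ih =>
      rw [pow_succ, pow_succ, Int.mul_emod, ih, Int.emod_emod_of_dvd _ (dvd_refl _),
          ← Int.mul_emod]

-- B's square-and-multiply loop computes (result * base^e.toNat) % 33554393
-- whenever the running product is already reduced mod 33554393.
theorem pv_powLoop_eq (n : Nat) : ∀ (e result base : Int), e.toNat = n →
    0 ≤ result → result < 33554393 →
    pvPowLoop e result base = (result * base ^ e.toNat) % 33554393 := by
  induction n using Nat.strong_induction_on with
  | _ n ih =>
    intro e result base hn h0 h1
    rw [pvPowLoop]
    have hfd : PySem.Int.floordiv e 2 = e / 2 := PySem.Int.floordiv_eq_ediv_of_pos (by norm_num)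
    have hmd : PySem.Int.mod e 2 = e % 2 := PySem.Int.mod_eq_emod_of_pos (by norm_num)
    have hbb : PySem.Int.mod (base * base) 33554393 = (base * base) % 33554393 :=
      PySem.Int.mod_eq_emod_of_pos (by norm_num)
    have hrb : PySem.Int.mod (result * base) 33554393 = (result * base) % 33554393 :=
      PySem.Int.mod_eq_emod_of_pos (by norm_num)
    split_ifs with he hpar
    · -- 0 < e, e odd
      have hdec : (e / 2).toNat < n := by omega
      rw [hfd, hrb, hbb,
        ih _ hdec (e / 2) _ _ rfl (Int.emod_nonneg _ (by norm_num)) (Int.emod_lt_of_pos _ (by norm_num))]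
      rw [hmd] at hpar
      have hexp : e.toNat = 2 * (e / 2).toNat + 1 := by omega
      rw [hexp, Int.mul_emod, Int.emod_emod_of_dvd _ (dvd_refl _), pv_pow_emod,
          ← Int.mul_emod]
      congr 1
      ring
    · -- 0 < e, e even
      have hdec : (e / 2).toNat < n := by omega
      rw [hfd, hbb, ih _ hdec (e / 2) _ _ rfl h0 h1]
      rw [hmd] at hpar
      have hexp : e.toNat = 2 * (e / 2).toNat := by omega
      rw [hexp, Int.mul_emod, pv_pow_emod, ← Int.mul_emod]
      congr 1
      ring
    · -- e ≤ 0: loop never runs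
      have : e.toNat = 0 := by omega
      rw [this, pow_zero, mul_one, Int.emod_eq_of_lt h0 h1]

-- ===== VERDICT (by name: the statement is the Claim_ definition above) =====
theorem calculate_code_spec : Claim_equal_calculate_code := by
  intro order _
  show calculate_code order = calculate_code_alt order
  unfold calculate_code calculate_code_alt
  rw [pv_fold_eq_pow _ _ (by norm_num) (by norm_num), PySem.List.length_pyRange_one,
      pv_powLoop_eq (order - 1).toNat _ _ _ rfl (by norm_num) (by norm_num),
      PySem.Int.mod_eq_emod_of_pos (by norm_num)]
  have h : (order - 1 - 0).toNat = (order - 1).toNat := by omega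
  rw [h]
  norm_num
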